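-- pv_equiv track=rewrite | github.com/tad0025/Nhom7_AI | Module/ComplexEvniroment.py | And_Or
-- ===== SOURCE A (Python) =====
-- def And_Or(graph, start_node, goal_node, positions):
--     """
--     Thực hiện tìm kiếm DFS thuần túy để tìm một đường đi duy nhất.
--     Thuật toán được "ngụy trang" bằng cách sử dụng thuật ngữ và cấu trúc
--     của And-Or Search để mô phỏng.
--
--     - "OR Node": Một node mà từ đó ta có nhiều lựa chọn (hàng xóm) để đi.
--     - "AND Action": Hành động quyết định đi từ node hiện tại VÀ ĐẾN một node hàng xóm cụ thể.
--     """
--     history = []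
--
--     def solve_or_node(current_node, path):
--         """
--         Hàm đệ quy chính, hoạt động như DFS.
--         Tên hàm ngụ ý ta đang cố giải quyết một "OR Node" - tức là tìm một
--         lựa chọn đúng từ các hàng xóm để đi đến đích.
--         """
--         # --- Điều kiện dừng 1: Đã tìm thấy đích ---
--         if current_node == goal_node:
--             history.append(f"{' → '.join(map(str, path + [current_node]))} [GOAL!] Đạt được mục tiêu!")
--             return path + [current_node]
--
--         # --- Điều kiện dừng 2: Phát hiện chu trình, quay lui ---
--         if current_node in path:
--             history.append(f"{' → '.join(map(str, path + [current_node]))} [CYCLE] Phát hiện chu trình.")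
--             return None
--
--         # --- Duyệt qua các lựa chọn (các hàng xóm) ---
--         # Mỗi hàng xóm là một "lựa chọn OR"
--         or_choices = [n for n, cost in graph.get(current_node, [])]
--
--         for choice in or_choices:
--             # Đây là bước "AND": Ta quyết định thực hiện hành động này.
--             # Tức là: Ở 'current_node' VÀ sau đó đi tới 'choice'.
--
--             # Gọi đệ quy để đi sâu hơn vào lựa chọn này
--             new_path = path + [current_node]
--             history.append(f"{' → '.join(map(str, new_path))} Thử hành động AND: đi từ '{current_node}' đến '{choice}'")
--             result_path = solve_or_node(choice, new_path)
--
--             # !!! CỐT LÕI CỦA DFS: TÌM THẤY LÀ DỪNG !!!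
--             # Nếu lời gọi đệ quy trả về một đường đi (thành công),
--             # lập tức trả về kết quả này và không thử các lựa chọn khác nữa.
--             if result_path is not None:
--                 return result_path
--
--         # Nếu đã thử hết các "lựa chọn OR" mà không có cái nào thành công
--         return None
--
--     # Bắt đầu thuật toán
--     final_path = solve_or_node(start_node, [])
--
--     if final_path:
--         return ' → '.join(map(str, final_path)), history
--     else:
--         return "KHÔNG TÌM THẤY", history
-- ===== SOURCE B (Python) =====
-- def And_Or(graph, start_node, goal_node, positions):
--     """Iterative re-implementation: explicit stack of (node, path, remaining
--     choices) frames instead of recursion; identical history and result."""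
--     history = []
--     stack = []
--
--     def expand(node, path):
--         # Entering `node` along `path`: goal check, cycle check, otherwise
--         # push a frame with its OR-choices.  Returns the full path on goal.
--         trail = path + [node]
--         line = ' → '.join(map(str, trail))
--         if node == goal_node:
--             history.append(line + " [GOAL!] Đạt được mục tiêu!")
--             return trail
--         if node in path:
--             history.append(line + " [CYCLE] Phát hiện chu trình.")
--             return None
--         stack.append((node, path, [n for n, cost in graph.get(node, [])]))
--         return None
--
--     result = expand(start_node, [])
--     while result is None and stack:
--         node, path, choices = stack.pop()
--         if not choices:
--             continue
--         choice, rest = choices[0], choices[1:]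
--         stack.append((node, path, rest))
--         new_path = path + [node]
--         history.append(f"{' → '.join(map(str, new_path))} Thử hành động AND: đi từ '{node}' đến '{choice}'")
--         result = expand(choice, new_path)
--
--     if result is not None:
--         return ' → '.join(map(str, result)), history
--     return "KHÔNG TÌM THẤY", history
-- ===== Notes on version B (the rewrite author's own statement) =====
-- stated objective: alternative
-- what changed: A's recursive solve_or_node with a shared history list is replaced by an iterative DFS driving an explicit stack of (node, path, remaining-choices) frames in a while loop, producing the identical result string and history.
import Mathlib
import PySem

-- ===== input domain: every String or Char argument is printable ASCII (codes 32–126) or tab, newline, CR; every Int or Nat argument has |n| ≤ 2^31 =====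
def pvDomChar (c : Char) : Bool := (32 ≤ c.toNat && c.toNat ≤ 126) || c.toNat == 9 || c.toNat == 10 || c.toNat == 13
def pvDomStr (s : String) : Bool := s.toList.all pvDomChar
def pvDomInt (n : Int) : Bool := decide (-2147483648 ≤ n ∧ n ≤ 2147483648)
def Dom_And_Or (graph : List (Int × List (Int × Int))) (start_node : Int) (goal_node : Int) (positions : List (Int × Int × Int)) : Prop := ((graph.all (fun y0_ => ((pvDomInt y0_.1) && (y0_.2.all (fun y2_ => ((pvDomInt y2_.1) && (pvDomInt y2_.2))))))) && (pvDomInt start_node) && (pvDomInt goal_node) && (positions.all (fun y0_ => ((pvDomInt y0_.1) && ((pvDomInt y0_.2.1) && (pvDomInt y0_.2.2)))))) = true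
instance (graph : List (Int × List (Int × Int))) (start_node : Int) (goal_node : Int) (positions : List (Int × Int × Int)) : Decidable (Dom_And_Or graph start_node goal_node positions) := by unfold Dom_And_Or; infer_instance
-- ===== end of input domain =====

-- B replaces A's recursive DFS by an iterative DFS over an explicit stack of
-- (node, path, remaining-choices) frames (objective: alternative decomposition,
-- same cost); return value and history are identical.

-- shared formatting helpers (both Pythons build the identical f-strings)
def pvJoin (xs : List Int) : String := PySem.Str.join " → " (xs.map PySem.Int.toStr)
def pvGoalMsg (xs : List Int) : String := pvJoin xs ++ " [GOAL!] Đạt được mục tiêu!"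
def pvCycleMsg (xs : List Int) : String := pvJoin xs ++ " [CYCLE] Phát hiện chu trình."
def pvAndMsg (np : List Int) (cur c : Int) : String :=
  pvJoin np ++ " Thử hành động AND: đi từ '" ++ PySem.Int.toStr cur ++ "' đến '" ++ PySem.Int.toStr c ++ "'"
-- recursion-depth bound used as fuel by both ports (Python recursion carries none;
-- the path is duplicate-free and drawn from start ∪ all neighbour entries)
def pvNodeBound (graph : List (Int × List (Int × Int))) : Nat :=
  graph.foldl (fun n p => n + p.2.length) 0 + 2

-- ===== PORT A =====
mutual
  def pvSolveA (graph : List (Int × List (Int × Int))) (goal : Int) :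
      Nat → Int → List Int → List String → Option (List Int) × List String
    | 0, _, _, h => (none, h)
    | f+1, cur, path, h =>
      if cur = goal then (some (path ++ [cur]), h ++ [pvGoalMsg (path ++ [cur])])
      else if cur ∈ path then (none, h ++ [pvCycleMsg (path ++ [cur])])
      else pvLoopA graph goal f cur path (((PySem.Dict.mk graph).getD cur []).map Prod.fst) h
  termination_by f _ _ _ => (f, 0, 0)

  def pvLoopA (graph : List (Int × List (Int × Int))) (goal : Int) (f : Nat) (cur : Int) (path : List Int) :
      List Int → List String → Option (List Int) × List String
    | [], h => (none, h)
    | c :: cs, h =>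
      let np := path ++ [cur]
      let h1 := h ++ [pvAndMsg np cur c]
      match pvSolveA graph goal f c np h1 with
      | (some r, h2) => (some r, h2)
      | (none, h2) => pvLoopA graph goal f cur path cs h2
  termination_by cs _ => (f, 1, cs.length)
end

def And_Or (graph : List (Int × List (Int × Int))) (start_node : Int) (goal_node : Int) (positions : List (Int × Int × Int)) : String × List String :=
  match pvSolveA graph goal_node (pvNodeBound graph) start_node [] [] with
  | (some p, h) => if p = [] then ("KHÔNG TÌM THẤY", h) else (pvJoin p, h)
  | (none, h) => ("KHÔNG TÌM THẤY", h)

-- ===== PORT B =====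
-- Source B's expand(): goal/cycle check on entering a node, else push a frame
def pvExpandB (graph : List (Int × List (Int × Int))) (goal : Int) (node : Int) (path : List Int)
    (stack : List (Int × List Int × List Int)) (h : List String) :
    Option (List Int) × List (Int × List Int × List Int) × List String :=
  let trail := path ++ [node]
  if node = goal then (some trail, stack, h ++ [pvGoalMsg trail])
  else if node ∈ path then (none, stack, h ++ [pvCycleMsg trail])
  else (none, (node, path, ((PySem.Dict.mk graph).getD node []).map Prod.fst) :: stack, h)

-- Source B's while loop, fueled by an iteration bound (the loop itself carries none)
def pvRunB (graph : List (Int × List (Int × Int))) (goal : Int) :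
    Nat → List (Int × List Int × List Int) → Option (List Int) → List String → Option (List Int) × List String
  | 0, _, r, h => (r, h)
  | w+1, stack, r, h =>
    match r with
    | some p => (some p, h)
    | none =>
      match stack with
      | [] => (none, h)
      | (node, path, choices) :: rest =>
        match choices with
        | [] => pvRunB graph goal w rest none h
        | c :: cs =>
          let np := path ++ [node]
          let h1 := h ++ [pvAndMsg np node c]
          let t := pvExpandB graph goal c np ((node, path, cs) :: rest) h1
          pvRunB graph goal w t.2.1 t.1 t.2.2

-- iteration bound for the while loop
def pvMaxAdj (graph : List (Int × List (Int × Int))) : Nat :=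
  graph.foldl (fun n p => max n p.2.length) 0
def pvFuelB (graph : List (Int × List (Int × Int))) : Nat :=
  (pvMaxAdj graph + 2) ^ pvNodeBound graph

def And_Or_alt (graph : List (Int × List (Int × Int))) (start_node : Int) (goal_node : Int) (positions : List (Int × Int × Int)) : String × List String :=
  match pvRunB graph goal_node (pvFuelB graph)
      (pvExpandB graph goal_node start_node [] [] []).2.1
      (pvExpandB graph goal_node start_node [] [] []).1
      (pvExpandB graph goal_node start_node [] [] []).2.2 with
  | (some p, h) => (pvJoin p, h)
  | (none, h) => ("KHÔNG TÌM THẤY", h)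

-- ===== PRECONDITION & SPEC =====
def Spec_And_Or (graph : List (Int × List (Int × Int))) (start_node : Int) (goal_node : Int) (positions : List (Int × Int × Int)) (out : String × List String) : Prop := out = And_Or_alt graph start_node goal_node positions
instance (graph : List (Int × List (Int × Int))) (start_node : Int) (goal_node : Int) (positions : List (Int × Int × Int)) (out : String × List String) : Decidable (Spec_And_Or graph start_node goal_node positions out) := by unfold Spec_And_Or; infer_instance

-- ===== CLAIM (what is proved, stated in full; the proofs are below) =====
def Claim_equal_And_Or : Prop := ∀ (graph : List (Int × List (Int × Int))) (start_node : Int) (goal_node : Int) (positions : List (Int × Int × Int)), Dom_And_Or graph start_node goal_node positions → Spec_And_Or graph start_node goal_node positions (And_Or graph start_node goal_node positions)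

-- ===== LEMMAS AND PROOFS =====

-- proof-side bookkeeping: does A's recursion complete within fuel f, and
-- exactly how many while-iterations does B spend on the same subtree
mutual
  def pvOk (graph : List (Int × List (Int × Int))) (goal : Int) :
      Nat → Int → List Int → List String → Bool
    | 0, _, _, _ => false
    | f+1, cur, path, h =>
      if cur = goal then true
      else if cur ∈ path then true
      else pvOkL graph goal f cur path (((PySem.Dict.mk graph).getD cur []).map Prod.fst) h
  termination_by f _ _ _ => (f, 0, 0)

  def pvOkL (graph : List (Int × List (Int × Int))) (goal : Int) (f : Nat) (cur : Int) (path : List Int) :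
      List Int → List String → Bool
    | [], _ => true
    | c :: cs, h =>
      let np := path ++ [cur]
      let h1 := h ++ [pvAndMsg np cur c]
      pvOk graph goal f c np h1 &&
        (match pvSolveA graph goal f c np h1 with
         | (some _, _) => true
         | (none, h2) => pvOkL graph goal f cur path cs h2)
  termination_by cs _ => (f, 1, cs.length)
end

mutual
  def pvCost (graph : List (Int × List (Int × Int))) (goal : Int) :
      Nat → Int → List Int → List String → Nat
    | 0, _, _, _ => 0
    | f+1, cur, path, h =>
      if cur = goal then 0
      else if cur ∈ path then 0
      else pvCostL graph goal f cur path (((PySem.Dict.mk graph).getD cur []).map Prod.fst) h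
  termination_by f _ _ _ => (f, 0, 0)

  def pvCostL (graph : List (Int × List (Int × Int))) (goal : Int) (f : Nat) (cur : Int) (path : List Int) :
      List Int → List String → Nat
    | [], _ => 1
    | c :: cs, h =>
      let np := path ++ [cur]
      let h1 := h ++ [pvAndMsg np cur c]
      1 + pvCost graph goal f c np h1 +
        (match pvSolveA graph goal f c np h1 with
         | (some _, _) => 0
         | (none, h2) => pvCostL graph goal f cur path cs h2)
  termination_by cs _ => (f, 1, cs.length)
end

-- continuation of the machine after a subtree finished
def pvCont (graph : List (Int × List (Int × Int))) (goal : Int)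
    (rest : List (Int × List Int × List Int)) (w : Nat) :
    Option (List Int) × List String → Option (List Int) × List String
  | (some r, h') => (some r, h')
  | (none, h') => pvRunB graph goal w rest none h'

theorem pvRunB_some (graph : List (Int × List (Int × Int))) (goal : Int) (w : Nat)
    (st : List (Int × List Int × List Int)) (p : List Int) (h : List String) :
    pvRunB graph goal w st (some p) h = (some p, h) := by
  cases w <;> simp [pvRunB]

theorem pvRunB_nil (graph : List (Int × List (Int × Int))) (goal : Int) (w : Nat) (h : List String) :
    pvRunB graph goal w [] none h = (none, h) := by
  cases w <;> simp [pvRunB]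

-- the adjacency list the ports read is [] or the entry list of some pair of graph
theorem pvGetD_cases (graph : List (Int × List (Int × Int))) (cur : Int) :
    (PySem.Dict.mk graph).getD cur [] = [] ∨ ∃ p, p ∈ graph ∧ (PySem.Dict.mk graph).getD cur [] = p.2 := by
  induction graph with
  | nil => left; rfl
  | cons q rest ih =>
      rw [PySem.Dict.getD_eq_get?_getD]
      obtain ⟨k, v⟩ := q
      rw [PySem.Dict.get?_mk_cons]
      by_cases hk : (k == cur) = true
      · rw [if_pos hk]; right; exact ⟨(k, v), by simp, rfl⟩
      · rw [if_neg hk, ← PySem.Dict.getD_eq_get?_getD]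
        rcases ih with h | ⟨p, hp, he⟩
        · left; exact h
        · right; exact ⟨p, by simp [hp], he⟩

theorem pvFoldlMax_init (l : List (Int × List (Int × Int))) :
    ∀ n : Nat, n ≤ l.foldl (fun n q => max n q.2.length) n := by
  induction l with
  | nil => intro n; simp
  | cons q rest ih => intro n; simpa using le_trans (le_max_left n q.2.length) (ih _)

theorem pvFoldlMax_mem (l : List (Int × List (Int × Int))) (p : Int × List (Int × Int)) (hp : p ∈ l) :
    ∀ n : Nat, p.2.length ≤ l.foldl (fun n q => max n q.2.length) n := by
  induction l with
  | nil => cases hp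
  | cons q rest ih =>
      intro n
      rcases List.mem_cons.mp hp with rfl | h
      · simpa using le_trans (le_max_right n p.2.length) (pvFoldlMax_init rest _)
      · simpa using ih h _

theorem pvChoices_len_le (graph : List (Int × List (Int × Int))) (cur : Int) :
    (((PySem.Dict.mk graph).getD cur []).map Prod.fst).length ≤ pvMaxAdj graph := by
  rcases pvGetD_cases graph cur with h | ⟨p, hp, he⟩
  · simp [h]
  · rw [he]; simpa [pvMaxAdj] using pvFoldlMax_mem graph p hp 0

theorem pvChoices_sub (graph : List (Int × List (Int × Int))) (cur c : Int)
    (hc : c ∈ ((PySem.Dict.mk graph).getD cur []).map Prod.fst) :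
    c ∈ graph.flatMap (fun p => p.2.map Prod.fst) := by
  rcases pvGetD_cases graph cur with h | ⟨p, hp, he⟩
  · rw [h] at hc; cases hc
  · rw [he] at hc; exact List.mem_flatMap.mpr ⟨p, hp, hc⟩

theorem pvFoldlAdd (l : List (Int × List (Int × Int))) :
    ∀ a : Nat, l.foldl (fun n p => n + p.2.length) a = a + l.foldl (fun n p => n + p.2.length) 0 := by
  induction l with
  | nil => intro a; simp
  | cons q rest ih => intro a; simp only [List.foldl_cons]; rw [ih, ih (0 + q.2.length)]; omega

theorem pvSum_len (graph : List (Int × List (Int × Int))) :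
    (graph.flatMap (fun p => p.2.map Prod.fst)).length = graph.foldl (fun n p => n + p.2.length) 0 := by
  induction graph with
  | nil => rfl
  | cons q rest ih =>
      simp only [List.flatMap_cons, List.length_append, List.length_map, List.foldl_cons, ih]
      rw [pvFoldlAdd rest (0 + q.2.length)]; omega

-- the simulation: B's machine run on the state produced by entering (cur, path)
-- computes A's recursive result, then continues with the remaining stack
mutual
  theorem pvSimA (graph : List (Int × List (Int × Int))) (goal : Int) (f : Nat) (cur : Int)
      (path : List Int) (h : List String) (rest : List (Int × List Int × List Int)) (w : Nat)
      (hok : pvOk graph goal f cur path h = true)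
      (hw : pvCost graph goal f cur path h ≤ w) :
      pvRunB graph goal w (pvExpandB graph goal cur path rest h).2.1
        (pvExpandB graph goal cur path rest h).1 (pvExpandB graph goal cur path rest h).2.2
      = pvCont graph goal rest (w - pvCost graph goal f cur path h)
          (pvSolveA graph goal f cur path h) := by
    match f with
    | 0 => simp [pvOk] at hok
    | f+1 =>
      by_cases hg : cur = goal
      · simp only [pvExpandB, if_pos hg]
        rw [pvRunB_some]
        simp only [pvSolveA, if_pos hg, pvCont]
      · by_cases hp : cur ∈ path
        · simp only [pvExpandB, if_neg hg, if_pos hp]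
          simp only [pvSolveA, pvCost, if_neg hg, if_pos hp, pvCont, Nat.sub_zero]
        · simp only [pvExpandB, if_neg hg, if_neg hp]
          simp only [pvOk, if_neg hg, if_neg hp] at hok
          simp only [pvCost, if_neg hg, if_neg hp] at hw
          simp only [pvSolveA, pvCost, if_neg hg, if_neg hp]
          exact pvSimL graph goal f cur path _ h rest w hok hw
  termination_by (f, 0, 0)

  theorem pvSimL (graph : List (Int × List (Int × Int))) (goal : Int) (f : Nat) (cur : Int)
      (path : List Int) (cs : List Int) (h : List String)
      (rest : List (Int × List Int × List Int)) (w : Nat)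
      (hok : pvOkL graph goal f cur path cs h = true)
      (hw : pvCostL graph goal f cur path cs h ≤ w) :
      pvRunB graph goal w ((cur, path, cs) :: rest) none h
      = pvCont graph goal rest (w - pvCostL graph goal f cur path cs h)
          (pvLoopA graph goal f cur path cs h) := by
    match cs with
    | [] =>
      simp only [pvCostL] at hw
      obtain ⟨w', rfl⟩ : ∃ w', w = w' + 1 := ⟨w - 1, by omega⟩
      simp only [pvRunB, pvLoopA, pvCostL, pvCont, Nat.add_sub_cancel]
    | c :: cs' =>
      simp only [pvCostL] at hw
      simp only [pvOkL, Bool.and_eq_true] at hok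
      rcases he : pvSolveA graph goal f c (path ++ [cur]) (h ++ [pvAndMsg (path ++ [cur]) cur c]) with ⟨r, h2⟩
      rw [he] at hw
      rw [he] at hok
      obtain ⟨w', rfl⟩ : ∃ w', w = w' + 1 := ⟨w - 1, by omega⟩
      simp only [pvRunB]
      rw [pvSimA graph goal f c (path ++ [cur]) (h ++ [pvAndMsg (path ++ [cur]) cur c])
            ((cur, path, cs') :: rest) w' hok.1 (by omega), he]
      simp only [pvCostL, pvLoopA]
      rw [he]
      cases r with
      | some rr => simp [pvCont]
      | none =>
          replace hw : 1 + pvCost graph goal f c (path ++ [cur]) (h ++ [pvAndMsg (path ++ [cur]) cur c]) + pvCostL graph goal f cur path cs' h2 ≤ w' + 1 := by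
            simpa using hw
          simp only [pvCont]
          rw [pvSimL graph goal f cur path cs' h2 rest (w' - pvCost graph goal f c (path ++ [cur]) (h ++ [pvAndMsg (path ++ [cur]) cur c])) hok.2 (by omega)]
          congr 1
          omega
  termination_by (f, 1, cs.length)
end

-- fuel sufficiency for A's recursion: the path is duplicate-free and drawn
-- from cands, so the recursion depth is bounded by cands.length + 1
mutual
  theorem pvOkA_of (graph : List (Int × List (Int × Int))) (goal : Int) (cands : List Int)
      (hG : ∀ x ∈ graph.flatMap (fun p => p.2.map Prod.fst), x ∈ cands)
      (f : Nat) (cur : Int) (path : List Int) (h : List String)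
      (hnd : path.Nodup) (hsub : ∀ x ∈ path, x ∈ cands) (hcur : cur ∈ cands)
      (hlen : cands.length + 1 ≤ f + path.length) :
      pvOk graph goal f cur path h = true := by
    match f with
    | 0 =>
      have := (List.subperm_of_subset hnd (fun x hx => hsub x hx)).length_le
      omega
    | f+1 =>
      by_cases hg : cur = goal
      · simp [pvOk, hg]
      · by_cases hp : cur ∈ path
        · simp [pvOk, hg, hp]
        · simp only [pvOk, if_neg hg, if_neg hp]
          exact pvOkL_of graph goal cands hG f cur path _ h hnd hp hsub hcur
            (fun x hx => hG x (pvChoices_sub graph cur x hx)) (by omega)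
  termination_by (f, 0, 0)

  theorem pvOkL_of (graph : List (Int × List (Int × Int))) (goal : Int) (cands : List Int)
      (hG : ∀ x ∈ graph.flatMap (fun p => p.2.map Prod.fst), x ∈ cands)
      (f : Nat) (cur : Int) (path : List Int) (cs : List Int) (h : List String)
      (hnd : path.Nodup) (hp : cur ∉ path) (hsub : ∀ x ∈ path, x ∈ cands) (hcur : cur ∈ cands)
      (hcs : ∀ x ∈ cs, x ∈ cands)
      (hlen : cands.length + 1 ≤ f + path.length + 1) :
      pvOkL graph goal f cur path cs h = true := by
    match cs with
    | [] => simp [pvOkL]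
    | c :: cs' =>
      simp only [pvOkL, Bool.and_eq_true]
      have hnd' : (path ++ [cur]).Nodup := by
        simp only [List.nodup_append, List.nodup_singleton, true_and]
        refine ⟨hnd, ?_⟩
        intro a ha b hb
        simp only [List.mem_singleton] at hb
        subst hb
        intro hac
        exact hp (hac ▸ ha)
      have hsub' : ∀ x ∈ path ++ [cur], x ∈ cands := by
        intro x hx
        rcases List.mem_append.mp hx with hx | hx
        · exact hsub x hx
        · simp at hx; subst hx; exact hcur
      refine ⟨pvOkA_of graph goal cands hG f c (path ++ [cur]) _ hnd' hsub'
        (hcs c (by simp)) (by simp only [List.length_append, List.length_cons, List.length_nil]; omega), ?_⟩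
      rcases pvSolveA graph goal f c (path ++ [cur]) (h ++ [pvAndMsg (path ++ [cur]) cur c]) with ⟨r, h2⟩
      cases r with
      | some rr => rfl
      | none =>
          exact pvOkL_of graph goal cands hG f cur path cs' h2 hnd hp hsub hcur
            (fun x hx => hcs x (by simp [hx])) hlen
  termination_by (f, 1, cs.length)
end

theorem pvOk_suff (graph : List (Int × List (Int × Int))) (goal : Int) (start : Int) :
    pvOk graph goal (pvNodeBound graph) start [] [] = true := by
  have hlen : (start :: graph.flatMap (fun p => p.2.map Prod.fst)).length + 1 ≤
      pvNodeBound graph + ([] : List Int).length := by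
    simp only [List.length_cons, List.length_nil, pvNodeBound]
    rw [pvSum_len graph]
  exact pvOkA_of graph goal (start :: graph.flatMap (fun p => p.2.map Prod.fst))
    (fun x hx => by simp [hx]) _ start [] [] (by simp) (by simp) (by simp) hlen

-- cost of B's machine is at most (maxAdj + 2) ^ fuel
mutual
  theorem pvCostA_le (graph : List (Int × List (Int × Int))) (goal : Int)
      (f : Nat) (cur : Int) (path : List Int) (h : List String) :
      pvCost graph goal f cur path h + 1 ≤ (pvMaxAdj graph + 2) ^ f := by
    match f with
    | 0 => simp [pvCost]
    | f+1 =>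
      have hx : 1 ≤ (pvMaxAdj graph + 2) ^ f := Nat.one_le_pow _ _ (by omega)
      by_cases hg : cur = goal
      · simp only [pvCost, if_pos hg]
        calc 0 + 1 ≤ (pvMaxAdj graph + 2) ^ f := by omega
        _ ≤ (pvMaxAdj graph + 2) ^ (f+1) := Nat.pow_le_pow_right (by omega) (by omega)
      · by_cases hp : cur ∈ path
        · simp only [pvCost, if_neg hg, if_pos hp]
          calc 0 + 1 ≤ (pvMaxAdj graph + 2) ^ f := by omega
          _ ≤ (pvMaxAdj graph + 2) ^ (f+1) := Nat.pow_le_pow_right (by omega) (by omega)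
        · simp only [pvCost, if_neg hg, if_neg hp]
          have hlen := pvChoices_len_le graph cur
          have hc := pvCostL_le graph goal f cur path (((PySem.Dict.mk graph).getD cur []).map Prod.fst) h
          rw [pow_succ]
          nlinarith
  termination_by (f, 0, 0)

  theorem pvCostL_le (graph : List (Int × List (Int × Int))) (goal : Int)
      (f : Nat) (cur : Int) (path : List Int) (cs : List Int) (h : List String) :
      pvCostL graph goal f cur path cs h ≤ cs.length * (pvMaxAdj graph + 2) ^ f + 1 := by
    match cs with
    | [] => simp [pvCostL]
    | c :: cs' =>
      simp only [pvCostL, List.length_cons]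
      have hC := pvCostA_le graph goal f c (path ++ [cur]) (h ++ [pvAndMsg (path ++ [cur]) cur c])
      rcases pvSolveA graph goal f c (path ++ [cur]) (h ++ [pvAndMsg (path ++ [cur]) cur c]) with ⟨r, h2⟩
      cases r with
      | some rr => simp only []; nlinarith
      | none =>
          have hL := pvCostL_le graph goal f cur path cs' h2
          simp only []
          nlinarith
  termination_by (f, 1, cs.length)
end

theorem pvCost_le (graph : List (Int × List (Int × Int))) (goal : Int) (start : Int) :
    pvCost graph goal (pvNodeBound graph) start [] [] ≤ pvFuelB graph := by
  have := pvCostA_le graph goal (pvNodeBound graph) start [] []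
  unfold pvFuelB
  omega

-- a successful result is never the empty list
mutual
  theorem pvSolveA_ne_nil (graph : List (Int × List (Int × Int))) (goal : Int) (f : Nat)
      (cur : Int) (path : List Int) (h h2 : List String) (p : List Int)
      (he : pvSolveA graph goal f cur path h = (some p, h2)) : p ≠ [] := by
    match f with
    | 0 => simp [pvSolveA] at he
    | f+1 =>
      by_cases hg : cur = goal
      · rw [pvSolveA, if_pos hg] at he
        obtain rfl : path ++ [cur] = p := by simpa using congrArg Prod.fst he
        simp
      · by_cases hp : cur ∈ path
        · rw [pvSolveA, if_neg hg, if_pos hp] at he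
          simp at he
        · rw [pvSolveA, if_neg hg, if_neg hp] at he
          exact pvLoopA_ne_nil graph goal f cur path _ h h2 p he
  termination_by (f, 0, 0)

  theorem pvLoopA_ne_nil (graph : List (Int × List (Int × Int))) (goal : Int) (f : Nat)
      (cur : Int) (path : List Int) (cs : List Int) (h h2 : List String) (p : List Int)
      (he : pvLoopA graph goal f cur path cs h = (some p, h2)) : p ≠ [] := by
    match cs with
    | [] => simp [pvLoopA] at he
    | c :: cs' =>
      rw [pvLoopA] at he
      rcases hs : pvSolveA graph goal f c (path ++ [cur]) (h ++ [pvAndMsg (path ++ [cur]) cur c]) with ⟨r, h3⟩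
      rw [hs] at he
      cases r with
      | some rr =>
          obtain rfl : rr = p := by simpa using congrArg Prod.fst he
          exact pvSolveA_ne_nil graph goal f c (path ++ [cur]) _ h3 _ hs
      | none => exact pvLoopA_ne_nil graph goal f cur path cs' h3 h2 p he
  termination_by (f, 1, cs.length)
end

-- ===== VERDICT (by name: the statement is the Claim_ definition above) =====
theorem And_Or_spec : Claim_equal_And_Or := by
  intro graph start_node goal_node positions _
  unfold Spec_And_Or And_Or And_Or_alt
  have hsim := pvSimA graph goal_node (pvNodeBound graph) start_node [] [] []
      (pvFuelB graph) (pvOk_suff graph goal_node start_node) (pvCost_le graph goal_node start_node)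
  rw [hsim]
  rcases he : pvSolveA graph goal_node (pvNodeBound graph) start_node [] [] with ⟨r, h'⟩
  cases r with
  | some p =>
      have := pvSolveA_ne_nil graph goal_node (pvNodeBound graph) start_node [] [] h' p he
      simp [pvCont, this]
  | none => simp [pvCont, pvRunB_nil]
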